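-- pv_equiv track=rewrite | github.com/nsky80/competitive_programming | CodeChef/August Long Challenge 2019 Division 2/Encoding.py | f
-- ===== SOURCE A (Python) =====
-- def f(num):
--     num = str(num)
--     current = num[0]
--     res = num[0]
--     for d in num[1:]:
--         if d == current:
--             res += '0'
--         else:
--             res += d
--             current = d
--     return int(res)
-- ===== SOURCE B (Python) =====
-- from itertools import groupby
--
-- def f(num):
--     # run-length grouping: each maximal run of an identical digit contributes
--     # the digit followed by (run_length - 1) zeros
--     return int(''.join(ch + '0' * (sum(1 for _ in grp) - 1)
--                        for ch, grp in groupby(str(num))))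
-- ===== Notes on version B (the rewrite author's own statement) =====
-- stated objective: idiomatic
-- what changed: Replaces the pairwise previous-digit state machine with itertools.groupby run-length grouping: each maximal run of an identical character emits the character followed by run_length-1 zeros.
import Mathlib
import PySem

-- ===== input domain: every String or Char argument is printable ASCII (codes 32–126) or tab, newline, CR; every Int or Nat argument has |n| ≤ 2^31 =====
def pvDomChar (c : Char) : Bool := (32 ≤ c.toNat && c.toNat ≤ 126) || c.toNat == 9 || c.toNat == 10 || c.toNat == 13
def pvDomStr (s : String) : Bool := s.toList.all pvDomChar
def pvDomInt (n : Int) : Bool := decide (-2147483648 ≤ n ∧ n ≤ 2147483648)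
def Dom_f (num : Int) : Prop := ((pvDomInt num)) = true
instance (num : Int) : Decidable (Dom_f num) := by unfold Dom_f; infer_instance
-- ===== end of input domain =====

-- B replaces A's previous-digit state machine by run-length grouping (itertools.groupby):
-- each maximal run of an identical character emits the character and run_length-1 zeros.


-- ===== PORT A =====
-- the 'for d in num[1:]' loop carrying (current, res); here res is built structurally
def fLoop (current : Char) : List Char → List Char
  | [] => []
  | d :: t => if d == current then '0' :: fLoop current t else d :: fLoop d t

def f (num : Int) : Int :=
  match (PySem.Int.toStr num).toList with
  | [] => 0   -- unreachable: str(num) is never empty (Python would raise IndexError)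
  | c :: rest => (PySem.Int.ofChars? (c :: fLoop c rest)).getD 0

-- ===== PORT B =====
-- itertools.groupby ported as the standard span recursion: each group is the head
-- character together with the following takeWhile-run of equal characters; the group
-- contributes its head followed by run_length-1 = (takeWhile run).length zeros.
def fAltLoop : List Char → List Char
  | [] => []
  | c :: t =>
      c :: ((t.takeWhile (· == c)).map (fun _ => '0') ++ fAltLoop (t.dropWhile (· == c)))
termination_by l => l.length
decreasing_by
  simp only [List.length_cons]
  exact Nat.lt_succ_of_le (List.length_dropWhile_le _ _)

def f_alt (num : Int) : Int :=
  (PySem.Int.ofChars? (fAltLoop (PySem.Int.toStr num).toList)).getD 0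

-- ===== PRECONDITION & SPEC =====
def Spec_f (num : Int) (out : Int) : Prop := out = f_alt num
instance (num : Int) (out : Int) : Decidable (Spec_f num out) := by unfold Spec_f; infer_instance

-- ===== CLAIM (what is proved, stated in full; the proofs are below) =====
def Claim_equal_f : Prop := ∀ (num : Int), Dom_f num → Spec_f num (f num)

-- ===== LEMMAS AND PROOFS =====

-- the zeros emitted for one run plus the recursive rest equal A's state machine output
theorem fAltLoop_eq_fLoop (t : List Char) (c : Char) :
    (t.takeWhile (· == c)).map (fun _ => '0') ++ fAltLoop (t.dropWhile (· == c)) =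
      fLoop c t := by
  induction t generalizing c with
  | nil => simp [fAltLoop, fLoop]
  | cons d t ih =>
      by_cases h : d == c
      · simp only [fLoop, List.takeWhile_cons, List.dropWhile_cons, h, if_pos,
          List.map_cons, List.cons_append]
        rw [ih c]
      · simp only [fLoop, List.takeWhile_cons, List.dropWhile_cons, h,
          Bool.false_eq_true, if_false, List.map_nil, List.nil_append]
        rw [fAltLoop, ih d]

theorem fAltLoop_cons (c : Char) (rest : List Char) :
    fAltLoop (c :: rest) = c :: fLoop c rest := by
  rw [fAltLoop]
  rw [fAltLoop_eq_fLoop]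

-- ===== VERDICT (by name: the statement is the Claim_ definition above) =====
theorem f_spec : Claim_equal_f := by
  intro num _
  unfold Spec_f f f_alt
  cases h : (PySem.Int.toStr num).toList with
  | nil => simp only [fAltLoop]; decide
  | cons c rest => rw [fAltLoop_cons]
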